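-- pv_equiv track=rewrite | github.com/0tak2/do-pass-together | bob/boj-21921-blog-managing.py | solution
-- ===== SOURCE A (Python) =====
-- def solution(totalDays, counts, windowSize):
--   maxCount = 0
--   windows = 0
--
--   currentCount = 0
--   for i in range(windowSize):
--     currentCount += counts[i]
--     maxCount = currentCount
--     windows = 1
--
--   for i in range(1, totalDays - windowSize + 1):
--     currentCount -= counts[i-1] # 사라지는 부분
--     currentCount += counts[i+windowSize-1] # 추가되는 부분
--     if currentCount > maxCount:
--       maxCount = currentCount
--       windows = 1
--     elif currentCount == maxCount:
--       windows += 1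
--
--   return maxCount, windows
-- ===== SOURCE B (Python) =====
-- def solution(totalDays, counts, windowSize):
--   prefix = [0]
--   for x in counts:
--     prefix.append(prefix[-1] + x)
--
--   maxCount = prefix[windowSize] - prefix[0]
--   windows = 1
--
--   for i in range(1, totalDays - windowSize + 1):
--     s = prefix[i + windowSize] - prefix[i]
--     if s > maxCount:
--       maxCount = s
--       windows = 1
--     elif s == maxCount:
--       windows += 1
--
--   return maxCount, windows
-- ===== Notes on version B (the rewrite author's own statement) =====
-- stated objective: alternative
-- what changed: Replaces the incremental add/subtract sliding-window accumulator with a prefix-sum table built in one pass, each window sum then read off as prefix[i+w]-prefix[i] in a second pass with the same >/== tie logic.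
-- outside the precondition, e.g. on solution(3, [1, 2, 3], 0): A returns (0, 3), B returns (0, 4); on solution(2, [4, 7, 3], -1): A returns (0, 1), B returns (14, 1)
import Mathlib
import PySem

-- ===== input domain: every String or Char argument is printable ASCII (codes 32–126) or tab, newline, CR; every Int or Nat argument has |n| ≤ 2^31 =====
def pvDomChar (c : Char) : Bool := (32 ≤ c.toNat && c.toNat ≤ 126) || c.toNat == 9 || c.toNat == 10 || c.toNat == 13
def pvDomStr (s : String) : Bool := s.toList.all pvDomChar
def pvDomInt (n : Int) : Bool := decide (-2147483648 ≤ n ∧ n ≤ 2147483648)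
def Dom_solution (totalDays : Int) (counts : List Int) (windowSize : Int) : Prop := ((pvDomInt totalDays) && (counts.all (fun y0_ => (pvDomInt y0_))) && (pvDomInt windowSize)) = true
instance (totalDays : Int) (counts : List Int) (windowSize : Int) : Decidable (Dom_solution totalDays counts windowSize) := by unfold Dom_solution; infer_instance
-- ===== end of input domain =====

-- B replaces A's incremental add/subtract sliding-window accumulator by a prefix-sum table built
-- once, each window sum then read off by subtraction (objective: alternative decomposition).

-- ===== PORT A =====
-- loop state = (maxCount, windows, currentCount)
def solution (totalDays : Int) (counts : List Int) (windowSize : Int) : Int × Int :=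
  let s0 : Int × Int × Int :=
    (PySem.List.pyRange 0 windowSize 1).foldl
      (fun st i =>
        let cur := st.2.2 + PySem.List.pyGetD counts i 0
        (cur, 1, cur))
      (0, 0, 0)
  let s1 : Int × Int × Int :=
    (PySem.List.pyRange 1 (totalDays - windowSize + 1) 1).foldl
      (fun st i =>
        let cur := st.2.2 - PySem.List.pyGetD counts (i - 1) 0
                          + PySem.List.pyGetD counts (i + windowSize - 1) 0
        if cur > st.1 then (cur, 1, cur)
        else if cur = st.1 then (st.1, st.2.1 + 1, cur)
        else (st.1, st.2.1, cur))
      s0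
  (s1.1, s1.2.1)

-- ===== PORT B =====
def solution_alt (totalDays : Int) (counts : List Int) (windowSize : Int) : Int × Int :=
  let pre : List Int :=
    counts.foldl (fun p x => p ++ [PySem.List.pyGetD p (-1) 0 + x]) [0]
  let st0 : Int × Int :=
    (PySem.List.pyGetD pre windowSize 0 - PySem.List.pyGetD pre 0 0, 1)
  (PySem.List.pyRange 1 (totalDays - windowSize + 1) 1).foldl
    (fun st i =>
      let s := PySem.List.pyGetD pre (i + windowSize) 0 - PySem.List.pyGetD pre i 0
      if s > st.1 then (s, 1)
      else if s = st.1 then (st.1, st.2 + 1)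
      else st)
    st0

-- ===== PRECONDITION & SPEC =====
-- Pre_ excludes (a) inputs where A raises IndexError (windowSize > len(counts), or second-loop
-- indices past the end of counts), and (b) windowSize ≤ 0, where A's returned value (zero-sum
-- windows read through Python negative-index wraparound, with windows possibly 0) is an accidental
-- degenerate corner that B counts differently.
def Pre_solution (totalDays : Int) (counts : List Int) (windowSize : Int) : Prop :=
  1 ≤ windowSize ∧ windowSize ≤ (counts.length : Int) ∧
    (totalDays ≤ windowSize ∨ totalDays ≤ (counts.length : Int))
instance (totalDays : Int) (counts : List Int) (windowSize : Int) : Decidable (Pre_solution totalDays counts windowSize) := by unfold Pre_solution; infer_instance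
def pvWitness_solution : Int × List Int × Int := (4, [2, 1, 1, 2], 2)

def Spec_solution (totalDays : Int) (counts : List Int) (windowSize : Int) (out : Int × Int) : Prop := out = solution_alt totalDays counts windowSize
instance (totalDays : Int) (counts : List Int) (windowSize : Int) (out : Int × Int) : Decidable (Spec_solution totalDays counts windowSize out) := by unfold Spec_solution; infer_instance

-- ===== CLAIM (what is proved, stated in full; the proofs are below) =====
def Claim_equal_solution : Prop := ∀ (totalDays : Int) (counts : List Int) (windowSize : Int), Dom_solution totalDays counts windowSize → Pre_solution totalDays counts windowSize → Spec_solution totalDays counts windowSize (solution totalDays counts windowSize)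

-- ===== LEMMAS AND PROOFS =====

-- canonical prefix-sum table
def pvPre (c : List Int) : List Int :=
  (List.range (c.length + 1)).map (fun k => (c.take k).sum)

lemma pvPre_append (c : List Int) (x : Int) :
    pvPre (c ++ [x]) = pvPre c ++ [c.sum + x] := by
  unfold pvPre
  rw [show (c ++ [x]).length = c.length + 1 by simp, List.range_succ, List.map_append]
  congr 1
  · apply List.map_congr_left
    intro k hk
    simp at hk
    rw [List.take_append_of_le_length (by omega)]
  · simp [List.take_of_length_le]

lemma pvPre_ne_nil (c : List Int) : pvPre c ≠ [] := by
  unfold pvPre; simp [List.range_succ]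

lemma pvPre_last (c : List Int) : ∀ h, (pvPre c).getLast h = c.sum := by
  induction c using List.reverseRecOn with
  | nil => intro h; simp [pvPre]
  | append_singleton d x ih =>
      intro h
      simp only [pvPre_append]
      simp

-- B's fold builds exactly pvPre
lemma build_pre (c : List Int) :
    c.foldl (fun p x => p ++ [PySem.List.pyGetD p (-1) 0 + x]) [0] = pvPre c := by
  induction c using List.reverseRecOn with
  | nil => simp [pvPre]
  | append_singleton d x ih =>
      rw [List.foldl_append, ih, List.foldl_cons, List.foldl_nil, pvPre_append]
      congr 2
      rw [PySem.List.pyGetD_neg_one (pvPre d) 0 (pvPre_ne_nil d), pvPre_last]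

lemma pvPre_get (c : List Int) (i : Int) (h0 : 0 ≤ i) (h1 : i ≤ (c.length : Int)) :
    PySem.List.pyGetD (pvPre c) i 0 = (c.take i.toNat).sum := by
  rw [PySem.List.pyGetD_eq_getElem (h0 := h0) (h1 := by simp [pvPre]; omega)]
  simp [pvPre]

lemma sum_take_succ (c : List Int) (k : Nat) (hk : k < c.length) :
    (c.take (k + 1)).sum = (c.take k).sum + c.getD k 0 := by
  rw [List.getD_eq_getElem c 0 hk, List.sum_take_succ c k hk]

-- A's first loop computes the sum of the first k elements (maxCount = that sum, windows = 1)
lemma first_loop (c : List Int) : ∀ (k : Nat), k ≠ 0 → k ≤ c.length → ∀ (st : Int × Int × Int),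
    (PySem.List.pyRange 0 (k : Int) 1).foldl
      (fun st i => let cur := st.2.2 + PySem.List.pyGetD c i 0; (cur, 1, cur)) st
    = (st.2.2 + (c.take k).sum, 1, st.2.2 + (c.take k).sum) := by
  intro k
  induction k with
  | zero => intro h; exact absurd rfl h
  | succ k ih =>
      intro _ hlen st
      by_cases hk : k = 0
      · subst hk
        rw [show ((1:Nat):Int) = 0 + 1 by norm_num, PySem.List.pyRange_one_singleton]
        simp only [List.foldl_cons, List.foldl_nil]
        rw [PySem.List.pyGetD_eq_getElem (h0 := by norm_num) (h1 := by exact_mod_cast hlen)]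
        have hs := List.sum_take_succ c 0 (by omega)
        simp at hs
        simp [hs]
      · rw [show ((k+1:Nat):Int) = (k:Int) + 1 by push_cast; ring,
            PySem.List.pyRange_one_succ_right (by positivity), List.foldl_append, ih hk (by omega) st]
        simp only [List.foldl_cons, List.foldl_nil]
        rw [PySem.List.pyGetD_eq_getElem (h0 := by positivity) (h1 := by exact_mod_cast hlen)]
        have hs := sum_take_succ c k (by omega)
        rw [List.getD_eq_getElem c 0 (by omega)] at hs
        simp only [Int.toNat_natCast, hs, Prod.mk.injEq]
        exact ⟨by ring, trivial, by ring⟩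

-- the two second loops agree on the (maxCount, windows) components, given the running-sum invariant
lemma second_loop (c : List Int) (t w : Int) (hw : 1 ≤ w)
    (htn : t ≤ (c.length : Int)) :
    ∀ (k : Nat) (j m win : Int), 1 ≤ j → t - w + 1 - j ≤ (k : Int) →
    (let r := (PySem.List.pyRange j (t - w + 1) 1).foldl
      (fun st i =>
        let cur := st.2.2 - PySem.List.pyGetD c (i - 1) 0
                          + PySem.List.pyGetD c (i + w - 1) 0
        if cur > st.1 then (cur, 1, cur)
        else if cur = st.1 then (st.1, st.2.1 + 1, cur)
        else (st.1, st.2.1, cur))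
      (m, win, (c.take (j - 1 + w).toNat).sum - (c.take (j - 1).toNat).sum)
     (r.1, r.2.1))
    = (PySem.List.pyRange j (t - w + 1) 1).foldl
        (fun st i =>
          let s := PySem.List.pyGetD (pvPre c) (i + w) 0 - PySem.List.pyGetD (pvPre c) i 0
          if s > st.1 then (s, 1)
          else if s = st.1 then (st.1, st.2 + 1)
          else st)
        (m, win) := by
  intro k
  induction k with
  | zero =>
      intro j m win hj hk
      rw [PySem.List.pyRange_one_eq_nil (by omega)]
      simp
  | succ k ih =>
      intro j m win hj hk
      by_cases hend : t - w + 1 ≤ j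
      · rw [PySem.List.pyRange_one_eq_nil hend]; simp
      · push_neg at hend
        rw [PySem.List.pyRange_one_cons hend]
        simp only [List.foldl_cons]
        have hA1 : PySem.List.pyGetD c (j - 1) 0 = c.getD (j-1).toNat 0 := by
          rw [PySem.List.pyGetD_eq_getElem (h0 := by omega) (h1 := by omega),
              List.getD_eq_getElem c 0 (by omega)]
        have hA2 : PySem.List.pyGetD c (j + w - 1) 0 = c.getD (j+w-1).toNat 0 := by
          rw [PySem.List.pyGetD_eq_getElem (h0 := by omega) (h1 := by omega),
              List.getD_eq_getElem c 0 (by omega)]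
        have hs1 : (c.take (j+w).toNat).sum = (c.take (j+w-1).toNat).sum + c.getD (j+w-1).toNat 0 := by
          have := sum_take_succ c (j+w-1).toNat (by omega)
          rw [show (j+w-1).toNat + 1 = (j+w).toNat by omega] at this
          exact this
        have hs2 : (c.take j.toNat).sum = (c.take (j-1).toNat).sum + c.getD (j-1).toNat 0 := by
          have := sum_take_succ c (j-1).toNat (by omega)
          rw [show (j-1).toNat + 1 = j.toNat by omega] at this
          exact this
        have hcur : (c.take (j - 1 + w).toNat).sum - (c.take (j - 1).toNat).sum
              - PySem.List.pyGetD c (j - 1) 0 + PySem.List.pyGetD c (j + w - 1) 0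
            = (c.take (j+w).toNat).sum - (c.take j.toNat).sum := by
          rw [hA1, hA2, hs1, hs2, show j - 1 + w = j + w - 1 by ring]
          ring
        simp only [hcur]
        have hB1 : PySem.List.pyGetD (pvPre c) (j + w) 0 = (c.take (j+w).toNat).sum :=
          pvPre_get c (j+w) (by omega) (by omega)
        have hB2 : PySem.List.pyGetD (pvPre c) j 0 = (c.take j.toNat).sum :=
          pvPre_get c j (by omega) (by omega)
        simp only [hB1, hB2]
        have e1 : j + 1 - 1 + w = j + w := by ring
        have e2 : j + 1 - 1 = j := by ring
        by_cases hgt : (c.take (j+w).toNat).sum - (c.take j.toNat).sum > m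
        · simp only [if_pos hgt]
          have h := ih (j+1) ((c.take (j+w).toNat).sum - (c.take j.toNat).sum) 1 (by omega) (by omega)
          rw [e1, e2] at h
          exact h
        · by_cases heq : (c.take (j+w).toNat).sum - (c.take j.toNat).sum = m
          · simp only [if_neg hgt, if_pos heq]
            have h := ih (j+1) m (win+1) (by omega) (by omega)
            rw [e1, e2] at h
            exact h
          · simp only [if_neg hgt, if_neg heq]
            have h := ih (j+1) m win (by omega) (by omega)
            rw [e1, e2] at h
            exact h

-- ===== VERDICT (by name: the statement is the Claim_ definition above) =====
theorem solution_spec : Claim_equal_solution := by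
  unfold Claim_equal_solution
  intro t c w _ hpre
  obtain ⟨hw, hwn, hdisj⟩ := hpre
  unfold Spec_solution solution solution_alt
  simp only [build_pre]
  have h1 : (PySem.List.pyRange 0 w 1).foldl
      (fun st i => let cur := st.2.2 + PySem.List.pyGetD c i 0; (cur, 1, cur)) ((0:Int), (0:Int), (0:Int))
      = ((c.take w.toNat).sum, 1, (c.take w.toNat).sum) := by
    rw [show w = ((w.toNat : Nat) : Int) by omega,
        first_loop c w.toNat (by omega) (by omega)]
    norm_num
    simp [show max w 0 = w from by omega]
  have h0 : PySem.List.pyGetD (pvPre c) w 0 - PySem.List.pyGetD (pvPre c) 0 0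
      = (c.take w.toNat).sum := by
    rw [pvPre_get c w (by omega) hwn, pvPre_get c 0 (by omega) (by positivity)]
    simp
  simp only [h1, h0]
  by_cases hle : t - w + 1 ≤ 1
  · rw [PySem.List.pyRange_one_eq_nil hle]
    simp
  · have htn : t ≤ (c.length : Int) := by
      rcases hdisj with h | h
      · omega
      · exact h
    have h2 := second_loop c t w hw htn (t - w).toNat 1 ((c.take w.toNat).sum) 1
      (by omega) (by omega)
    rw [show (1:Int) - 1 + w = w by ring] at h2
    simpa using h2
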